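-- pv_equiv track=rewrite | github.com/TencentBlueKing/bk-sops | pipeline_plugins/variables/collections/common.py | _generate_time_format
-- ===== SOURCE A (Python) =====
-- def _generate_time_format(needed_units):
--     """
--     根据用户选择的时间格式生成对应的转换格式字符串
--     """
--     time_units = [
--         ("year", "%Y", ""),
--         ("month", "%m", "-"),
--         ("day", "%d", "-"),
--         ("hour", "%H", ""),
--         ("minute", "%M", ":"),
--         ("second", "%S", ":"),
--     ]
--     final_format = ""
--     # needed_units 形如['year', 'month', 'day', 'hour', 'minute', 'second']
--     for time_unit in time_units:
--         unit, time_format, separator = time_unit[0], time_unit[1], time_unit[2]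
--         if unit == "hour":
--             final_format += " "
--         if unit in needed_units:
--             if len(final_format) > 0 and final_format[-1] != " ":
--                 final_format += separator
--             final_format += time_format
--     return final_format.strip()
-- ===== SOURCE B (Python) =====
-- def _generate_time_format(needed_units):
--     date_part = "-".join(
--         fmt for unit, fmt in [("year", "%Y"), ("month", "%m"), ("day", "%d")]
--         if unit in needed_units
--     )
--     time_part = ":".join(
--         fmt for unit, fmt in [("hour", "%H"), ("minute", "%M"), ("second", "%S")]
--         if unit in needed_units
--     )
--     return (date_part + " " + time_part).strip()
-- ===== Notes on version B (the rewrite author's own statement) =====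
-- stated objective: simpler
-- what changed: Replaced A's single stateful pass that tracks a per-unit separator and inspects the last emitted character with two independent group builds: '-'.join over the selected date formats and ':'.join over the selected time formats, combined with one space and stripped.
import Mathlib
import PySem

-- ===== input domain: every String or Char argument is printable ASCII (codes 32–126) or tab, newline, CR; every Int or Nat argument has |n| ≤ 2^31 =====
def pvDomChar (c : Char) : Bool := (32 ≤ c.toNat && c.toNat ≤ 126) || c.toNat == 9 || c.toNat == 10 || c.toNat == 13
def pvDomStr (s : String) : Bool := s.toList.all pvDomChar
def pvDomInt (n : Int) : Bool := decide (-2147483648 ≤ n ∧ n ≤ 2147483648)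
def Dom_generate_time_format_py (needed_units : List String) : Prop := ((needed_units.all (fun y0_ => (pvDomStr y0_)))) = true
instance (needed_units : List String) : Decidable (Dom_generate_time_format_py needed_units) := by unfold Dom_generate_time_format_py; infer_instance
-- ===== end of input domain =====

-- B replaces A's single stateful separator-tracking pass with two independent group joins
-- ('-' over selected date formats, ':' over selected time formats) combined by one space and strip (objective: simpler).


-- ===== PORT A =====
-- final_format is carried as List Char (PySem.Chars is the string model); the loop body is A's verbatim.
def generate_time_format_py (needed_units : List String) : String :=
  let time_units : List (String × List Char × List Char) :=
    [("year", ['%','Y'], []), ("month", ['%','m'], ['-']), ("day", ['%','d'], ['-']),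
     ("hour", ['%','H'], []), ("minute", ['%','M'], [':']), ("second", ['%','S'], [':'])]
  let final_format : List Char :=
    time_units.foldl (fun final_format time_unit =>
      let unit := time_unit.1
      let time_format := time_unit.2.1
      let separator := time_unit.2.2
      let final_format := if unit == "hour" then final_format ++ [' '] else final_format
      if needed_units.contains unit then
        let final_format :=
          if 0 < final_format.length ∧ PySem.List.pyGet? final_format (-1) ≠ some ' ' then
            final_format ++ separator
          else final_format
        final_format ++ time_format
      else final_format) []
  String.ofList (PySem.Chars.strip final_format)

-- ===== PORT B =====
def generate_time_format_py_alt (needed_units : List String) : String :=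
  let date_part : List Char :=
    PySem.Chars.join ['-']
      (([("year", ['%','Y']), ("month", ['%','m']), ("day", ['%','d'])].filter
          (fun p : String × List Char => needed_units.contains p.1)).map (fun p => p.2))
  let time_part : List Char :=
    PySem.Chars.join [':']
      (([("hour", ['%','H']), ("minute", ['%','M']), ("second", ['%','S'])].filter
          (fun p : String × List Char => needed_units.contains p.1)).map (fun p => p.2))
  String.ofList (PySem.Chars.strip (date_part ++ [' '] ++ time_part))

-- ===== PRECONDITION & SPEC =====
def Spec_generate_time_format_py (needed_units : List String) (out : String) : Prop := out = generate_time_format_py_alt needed_units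
instance (needed_units : List String) (out : String) : Decidable (Spec_generate_time_format_py needed_units out) := by unfold Spec_generate_time_format_py; infer_instance

-- ===== CLAIM (what is proved, stated in full; the proofs are below) =====
def Claim_equal_generate_time_format_py : Prop := ∀ (needed_units : List String), Dom_generate_time_format_py needed_units → Spec_generate_time_format_py needed_units (generate_time_format_py needed_units)

-- ===== LEMMAS AND PROOFS =====
-- Both outputs depend on needed_units only through the six membership tests; abstract them as booleans.

-- One iteration of A's loop body, with the membership test abstracted as a boolean.
def pvStepA (final_format : List Char) (b : Bool) (isHour : Bool) (time_format separator : List Char) : List Char :=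
  let final_format := if isHour then final_format ++ [' '] else final_format
  if b then
    let final_format :=
      if 0 < final_format.length ∧ PySem.List.pyGet? final_format (-1) ≠ some ' ' then
        final_format ++ separator
      else final_format
    final_format ++ time_format
  else final_format

-- A's whole pass as a function of the six booleans (definitionally equal to the port's unfolding).
def pvFoldA (b1 b2 b3 b4 b5 b6 : Bool) : String :=
  let f := pvStepA [] b1 false ['%','Y'] []
  let f := pvStepA f b2 false ['%','m'] ['-']
  let f := pvStepA f b3 false ['%','d'] ['-']
  let f := pvStepA f b4 true ['%','H'] []
  let f := pvStepA f b5 false ['%','M'] [':']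
  let f := pvStepA f b6 false ['%','S'] [':']
  String.ofList (PySem.Chars.strip f)

-- filter on a 3-element literal list with the three tests abstracted as booleans (defeq to List.filter's unfolding).
def pvSel (b1 b2 b3 : Bool) (x1 x2 x3 : String × List Char) : List (String × List Char) :=
  cond b1 (x1 :: cond b2 (x2 :: cond b3 [x3] []) (cond b3 [x3] []))
          (cond b2 (x2 :: cond b3 [x3] []) (cond b3 [x3] []))

-- B's two group joins as a function of the six booleans.
def pvJoinB (b1 b2 b3 b4 b5 b6 : Bool) : String :=
  let date_part := PySem.Chars.join ['-']
    ((pvSel b1 b2 b3 ("year", ['%','Y']) ("month", ['%','m']) ("day", ['%','d'])).map (fun p => p.2))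
  let time_part := PySem.Chars.join [':']
    ((pvSel b4 b5 b6 ("hour", ['%','H']) ("minute", ['%','M']) ("second", ['%','S'])).map (fun p => p.2))
  String.ofList (PySem.Chars.strip (date_part ++ [' '] ++ time_part))

lemma portA_eq (xs : List String) :
    generate_time_format_py xs =
      pvFoldA (xs.contains "year") (xs.contains "month") (xs.contains "day")
        (xs.contains "hour") (xs.contains "minute") (xs.contains "second") := rfl

lemma portB_eq (xs : List String) :
    generate_time_format_py_alt xs =
      pvJoinB (xs.contains "year") (xs.contains "month") (xs.contains "day")
        (xs.contains "hour") (xs.contains "minute") (xs.contains "second") := rfl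

lemma fold_eq_join : ∀ b1 b2 b3 b4 b5 b6 : Bool,
    pvFoldA b1 b2 b3 b4 b5 b6 = pvJoinB b1 b2 b3 b4 b5 b6 := by decide

-- ===== VERDICT (by name: the statement is the Claim_ definition above) =====
theorem generate_time_format_py_spec : Claim_equal_generate_time_format_py := by
  intro xs _
  unfold Spec_generate_time_format_py
  rw [portA_eq, portB_eq, fold_eq_join]
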